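-- pv_equiv track=rewrite | github.com/spotandjake/ccc-solutions | 2023/junior/Problem4/submit.py | problemCode
-- ===== SOURCE A (Python) =====
-- def problemCode(colCount, row1, row2):
--   totalTileCount = 0
--   triType = 0
--   for x in range(0, colCount):
--     if (x < (colCount - 1) and row1[x] == "1" and row1[x + 1] == "1"):
--       totalTileCount += 1
--     elif (row1[x] == "1"):
--       totalTileCount += 3
--
--     if (x < (colCount - 1) and row2[x] == "1" and row2[x + 1] == "1"):
--       totalTileCount += 1
--     elif (row2[x] == "1"):
--       totalTileCount += 3
--
--     if (row1[x] == "1" and row2[x] == "1" and triType == 0):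
--       totalTileCount -= 2
--     # Flip Tri
--     if (triType == 0):
--       triType = 1
--     else:
--       triType = 0
--   return f"{totalTileCount}"
-- ===== SOURCE B (Python) =====
-- def problemCode(colCount, row1, row2):
--   n = max(colCount, 0)
--   p1, p2 = row1[:n], row2[:n]
--   ones = p1.count("1") + p2.count("1")
--   pairs = sum(a == b == "1" for a, b in zip(p1, p1[1:])) \
--         + sum(a == b == "1" for a, b in zip(p2, p2[1:]))
--   overlap = sum(x % 2 == 0 and a == b == "1" for x, (a, b) in enumerate(zip(p1, p2)))
--   return f"{3 * ones - 2 * pairs - 2 * overlap}"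
-- ===== Notes on version B (the rewrite author's own statement) =====
-- stated objective: alternative
-- what changed: Replaces A's fused branching loop with toggle state by a branch-free counting formula: slice each row to colCount, then answer = 3*(ones) - 2*(adjacent '1' pairs via zip(row,row[1:])) - 2*(even-index common '1's via enumerate(zip)), i.e. per-column case analysis becomes arithmetic over three counts.
import Mathlib
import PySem

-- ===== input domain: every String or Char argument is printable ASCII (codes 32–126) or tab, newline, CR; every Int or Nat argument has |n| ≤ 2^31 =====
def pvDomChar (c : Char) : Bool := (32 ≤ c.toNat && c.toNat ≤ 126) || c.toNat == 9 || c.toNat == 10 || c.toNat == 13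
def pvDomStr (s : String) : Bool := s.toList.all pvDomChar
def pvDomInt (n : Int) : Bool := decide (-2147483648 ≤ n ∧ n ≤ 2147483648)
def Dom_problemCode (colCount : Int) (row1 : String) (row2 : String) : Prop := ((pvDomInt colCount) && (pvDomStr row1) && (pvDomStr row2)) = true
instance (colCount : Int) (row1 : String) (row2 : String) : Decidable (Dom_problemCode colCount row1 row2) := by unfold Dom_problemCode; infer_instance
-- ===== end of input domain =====

-- B replaces A's fused branching loop with toggle state by a branch-free counting formula:
-- 3*(ones in each row's first colCount columns) - 2*(adjacent '1'-pairs) - 2*(even-column common '1's).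

-- ===== PORT A =====
-- One iteration of A's loop body, carrying (totalTileCount, triType).
def pvStepA (colCount : Int) (row1 : String) (row2 : String) (st : Int × Int) (x : Int) : Int × Int :=
  let t := st.1
  let t := if x < colCount - 1 ∧ PySem.List.pyGet? row1.toList x = some '1' ∧ PySem.List.pyGet? row1.toList (x + 1) = some '1' then t + 1
           else if PySem.List.pyGet? row1.toList x = some '1' then t + 3 else t
  let t := if x < colCount - 1 ∧ PySem.List.pyGet? row2.toList x = some '1' ∧ PySem.List.pyGet? row2.toList (x + 1) = some '1' then t + 1
           else if PySem.List.pyGet? row2.toList x = some '1' then t + 3 else t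
  let t := if PySem.List.pyGet? row1.toList x = some '1' ∧ PySem.List.pyGet? row2.toList x = some '1' ∧ st.2 = 0 then t - 2 else t
  (t, if st.2 = 0 then 1 else 0)

def problemCode (colCount : Int) (row1 : String) (row2 : String) : String :=
  let st := (PySem.List.pyRange 0 colCount 1).foldl (pvStepA colCount row1 row2) ((0 : Int), (0 : Int))
  PySem.Int.toStr st.1

-- ===== PORT B =====
-- B's pair test 'a == b == "1"': both characters are '1'.
def pvPairOne (ab : Char × Char) : Bool := ab.1 == '1' && ab.2 == '1'
-- B's overlap test on an enumerate entry: even index and both characters '1'.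
def pvOvOne (e : Int × Char × Char) : Bool := PySem.Int.mod e.1 2 == 0 && e.2.1 == '1' && e.2.2 == '1'

def problemCode_alt (colCount : Int) (row1 : String) (row2 : String) : String :=
  let n : Int := max colCount 0
  let p1 := PySem.List.slice row1.toList none (some n)
  let p2 := PySem.List.slice row2.toList none (some n)
  -- p.count("1"): a one-character needle, so Python's substring count is the character count
  let ones : Int := (p1.count '1' : Int) + (p2.count '1' : Int)
  -- zip(p, p[1:]) with the 'a == b == "1"' generator summed: countP over the zip
  let pairs : Int := ((p1.zip (PySem.List.slice p1 (some 1) none)).countP pvPairOne : Int)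
                   + ((p2.zip (PySem.List.slice p2 (some 1) none)).countP pvPairOne : Int)
  let overlap : Int := ((PySem.List.enumerate (p1.zip p2) 0).countP pvOvOne : Int)
  PySem.Int.toStr (3 * ones - 2 * pairs - 2 * overlap)

-- ===== PRECONDITION & SPEC =====
-- Pre_ excludes exactly the inputs on which A raises IndexError: 0 < colCount with some row shorter than colCount.
def Pre_problemCode (colCount : Int) (row1 : String) (row2 : String) : Prop :=
  0 < colCount → (colCount ≤ (row1.toList.length : Int) ∧ colCount ≤ (row2.toList.length : Int))
instance (colCount : Int) (row1 : String) (row2 : String) : Decidable (Pre_problemCode colCount row1 row2) := by unfold Pre_problemCode; infer_instance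
def pvWitness_problemCode : Int × String × String := (2, "11", "10")

def Spec_problemCode (colCount : Int) (row1 : String) (row2 : String) (out : String) : Prop := out = problemCode_alt colCount row1 row2
instance (colCount : Int) (row1 : String) (row2 : String) (out : String) : Decidable (Spec_problemCode colCount row1 row2 out) := by unfold Spec_problemCode; infer_instance

-- ===== CLAIM (what is proved, stated in full; the proofs are below) =====
def Claim_equal_problemCode : Prop := ∀ (colCount : Int) (row1 : String) (row2 : String), Dom_problemCode colCount row1 row2 → Pre_problemCode colCount row1 row2 → Spec_problemCode colCount row1 row2 (problemCode colCount row1 row2)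

-- ===== LEMMAS AND PROOFS =====

-- Proof-side decomposition of A's fused loop: per-row contribution and overlap contribution.
def pvRowStep (colCount : Int) (row : String) (t : Int) (x : Int) : Int :=
  if x < colCount - 1 ∧ PySem.List.pyGet? row.toList x = some '1' ∧ PySem.List.pyGet? row.toList (x + 1) = some '1' then t + 1
  else if PySem.List.pyGet? row.toList x = some '1' then t + 3 else t

def pvOvStep (row1 : String) (row2 : String) (t : Int) (x : Int) : Int :=
  if PySem.Int.mod x 2 = 0 ∧ PySem.List.pyGet? row1.toList x = some '1' ∧ PySem.List.pyGet? row2.toList x = some '1' then t + 1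
  else t

-- One step of A's loop at column n, in decomposed form.
set_option maxHeartbeats 1600000 in
lemma pv_step (c : Int) (r1 r2 : String) (a1 a2 ov : Int) (n : ℕ) :
    pvStepA c r1 r2 (a1 + a2 - 2 * ov, if (n : Int) % 2 = 0 then 0 else 1) (n : Int)
      = (pvRowStep c r1 a1 (n : Int) + pvRowStep c r2 a2 (n : Int) - 2 * pvOvStep r1 r2 ov (n : Int),
         if ((n : Int) + 1) % 2 = 0 then 0 else 1) := by
  have hmod : PySem.Int.mod (n : Int) 2 = (n : Int) % 2 := by
    simp [PySem.Int.mod, Int.fmod_eq_emod]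
  unfold pvStepA pvRowStep pvOvStep
  simp only [hmod, Prod.mk.injEq]
  have hpar : ∀ z : Int, ((if (z + 1) % 2 = 0 then (0:Int) else 1) = if z % 2 = 0 then 1 else 0) := by
    intro z; split_ifs <;> omega
  rw [hpar]
  refine ⟨?_, by by_cases he : (n : Int) % 2 = 0 <;> simp [he]⟩
  by_cases he : (n : Int) % 2 = 0 <;>
    by_cases hb : (n : Int) < c - 1 <;>
    by_cases hp1 : PySem.List.pyGet? r1.toList (n : Int) = some '1' <;>
    by_cases hq1 : PySem.List.pyGet? r1.toList ((n : Int) + 1) = some '1' <;>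
    by_cases hp2 : PySem.List.pyGet? r2.toList (n : Int) = some '1' <;>
    by_cases hq2 : PySem.List.pyGet? r2.toList ((n : Int) + 1) = some '1' <;>
    simp only [he, hb, hp1, hq1, hp2, hq2, if_false, and_true, and_false, if_pos,
      and_self] <;>
    omega

-- A's loop state after the first n iterations: two row folds, an overlap fold, and the parity of n.
lemma pv_main (c : Int) (r1 r2 : String) (n : ℕ) :
    (PySem.List.pyRange 0 (n : Int) 1).foldl (pvStepA c r1 r2) ((0 : Int), (0 : Int))
      = ((PySem.List.pyRange 0 (n : Int) 1).foldl (pvRowStep c r1) 0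
         + (PySem.List.pyRange 0 (n : Int) 1).foldl (pvRowStep c r2) 0
         - 2 * (PySem.List.pyRange 0 (n : Int) 1).foldl (pvOvStep r1 r2) 0,
         if (n : Int) % 2 = 0 then (0 : Int) else 1) := by
  induction n with
  | zero => simp [PySem.List.pyRange_one_eq_nil]
  | succ n ih =>
    have h : PySem.List.pyRange 0 ((n : Int) + 1) 1
        = PySem.List.pyRange 0 (n : Int) 1 ++ [(n : Int)] :=
      PySem.List.pyRange_one_succ_right (by positivity)
    push_cast
    rw [h]
    simp only [List.foldl_append, List.foldl_cons, List.foldl_nil, ih]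
    exact pv_step c r1 r2 _ _ _ n

-- The row fold as range-based counts of ones and of (guarded) adjacent pairs.
lemma pv_row_count (c : Int) (r : String) (m : ℕ) (t : Int) :
    (PySem.List.pyRange 0 (m : Int) 1).foldl (pvRowStep c r) t
      = t + 3 * ((List.range m).countP (fun i => r.toList[i]? == some '1') : Int)
          - 2 * ((List.range m).countP
              (fun (i : ℕ) => decide ((i : Int) < c - 1) && (r.toList[i]? == some '1') && (r.toList[i+1]? == some '1')) : Int) := by
  induction m generalizing t with
  | zero => simp [PySem.List.pyRange_one_eq_nil]
  | succ m ih =>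
    have h : PySem.List.pyRange 0 ((m : Int) + 1) 1
        = PySem.List.pyRange 0 (m : Int) 1 ++ [(m : Int)] :=
      PySem.List.pyRange_one_succ_right (by positivity)
    push_cast
    rw [h, List.foldl_append, ih, List.foldl_cons, List.foldl_nil]
    rw [List.range_succ, List.countP_append, List.countP_append]
    have hget : ∀ k : ℕ, PySem.List.pyGet? r.toList (k : Int) = r.toList[k]? := by
      intro k; simp [pysem]
    unfold pvRowStep
    have hm1 : PySem.List.pyGet? r.toList ((m : Int) + 1) = r.toList[m+1]? := by
      rw [show ((m : Int) + 1) = ((m + 1 : ℕ) : Int) by push_cast; ring, hget]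
    rw [hget, hm1]
    by_cases hb : (m : Int) < c - 1 <;>
      by_cases hp : r.toList[m]? = some '1' <;>
      by_cases hq : r.toList[m+1]? = some '1' <;>
      simp [hb, hp, hq] <;> push_cast <;> ring

-- The overlap fold as a range-based count of even columns with two '1's.
lemma pv_ov_count (r1 r2 : String) (m : ℕ) (t : Int) :
    (PySem.List.pyRange 0 (m : Int) 1).foldl (pvOvStep r1 r2) t
      = t + ((List.range m).countP
          (fun (i : ℕ) => PySem.Int.mod (i : Int) 2 == 0 && (r1.toList[i]? == some '1') && (r2.toList[i]? == some '1')) : Int) := by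
  induction m generalizing t with
  | zero => simp [PySem.List.pyRange_one_eq_nil]
  | succ m ih =>
    have h : PySem.List.pyRange 0 ((m : Int) + 1) 1
        = PySem.List.pyRange 0 (m : Int) 1 ++ [(m : Int)] :=
      PySem.List.pyRange_one_succ_right (by positivity)
    push_cast
    rw [h, List.foldl_append, ih, List.foldl_cons, List.foldl_nil]
    rw [List.range_succ, List.countP_append]
    have hget : ∀ (r : String), PySem.List.pyGet? r.toList (m : Int) = r.toList[m]? := by
      intro r; simp [pysem]
    unfold pvOvStep
    rw [hget, hget]
    by_cases he : PySem.Int.mod (m : Int) 2 = 0 <;>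
      by_cases hp : r1.toList[m]? = some '1' <;>
      by_cases hq : r2.toList[m]? = some '1' <;>
      simp [he, hp, hq] <;> split_ifs <;> push_cast <;> ring

-- Counting ones in a prefix as a range count.
lemma pv_take_count (xs : List Char) (m : ℕ) (hm : m ≤ xs.length) :
    (xs.take m).count '1' = (List.range m).countP (fun i => xs[i]? == some '1') := by
  induction m with
  | zero => simp
  | succ m ih =>
    have hlt : m < xs.length := by omega
    rw [List.take_succ, List.range_succ, List.count_append, List.countP_append,
      ih (by omega)]
    simp [List.count_cons, hlt, beq_iff_eq]

-- Adjacent-pair count via zip(xs, xs.tail) as a range count.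
lemma pv_zip_count (xs : List Char) :
    (xs.zip xs.tail).countP pvPairOne
      = (List.range (xs.length - 1)).countP
          (fun i => (xs[i]? == some '1') && (xs[i+1]? == some '1')) := by
  induction xs with
  | nil => simp
  | cons a t ih =>
    cases t with
    | nil => simp
    | cons b u =>
      simp only [List.tail_cons] at ih ⊢
      rw [List.zip_cons_cons, List.countP_cons]
      have hlen : (a :: b :: u).length - 1 = ((b :: u).length - 1) + 1 := by
        simp
      rw [hlen, List.range_succ_eq_map, List.countP_cons, List.countP_map]
      have hcomp : ((fun (i : ℕ) => ((a :: b :: u)[i]? == some '1') && ((a :: b :: u)[i+1]? == some '1')) ∘ Nat.succ)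
          = (fun (i : ℕ) => ((b :: u)[i]? == some '1') && ((b :: u)[i+1]? == some '1')) := by
        funext i; simp [Function.comp]
      rw [hcomp, ih]
      simp [pvPairOne]

-- Enumerate-based overlap count as a range count (both prefixes have length m).
lemma pv_enum_count (xs ys : List Char) (m : ℕ) (hx : m ≤ xs.length) (hy : m ≤ ys.length) :
    ((PySem.List.enumerate ((xs.take m).zip (ys.take m)) 0).countP pvOvOne)
      = (List.range m).countP
          (fun (i : ℕ) => PySem.Int.mod (i : Int) 2 == 0 && (xs[i]? == some '1') && (ys[i]? == some '1')) := by
  induction m with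
  | zero => simp [PySem.List.enumerate]
  | succ m ih =>
    have hx' : m < xs.length := by omega
    have hy' : m < ys.length := by omega
    have h1 : xs.take (m+1) = xs.take m ++ [xs[m]] := by
      rw [List.take_succ]; simp [List.getElem?_eq_getElem hx']
    have h2 : ys.take (m+1) = ys.take m ++ [ys[m]] := by
      rw [List.take_succ]; simp [List.getElem?_eq_getElem hy']
    have hzl : ((xs.take m).zip (ys.take m)).length = m := by
      simp [List.length_zip]; omega
    rw [h1, h2, List.zip_append (by simp; omega), PySem.List.enumerate_append,
      List.countP_append, ih (by omega) (by omega), List.range_succ, List.countP_append]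
    simp only [hzl, List.zip_cons_cons, List.zip_nil_right]
    unfold pvOvOne
    simp [List.getElem?_eq_getElem hx', List.getElem?_eq_getElem hy', Nat.zero_add]
  termination_by m

-- The guarded pair range-count collapses to range (m-1) when c = m.
lemma pv_guard_collapse (xs : List Char) (m : ℕ) :
    ((List.range m).countP
      (fun (i : ℕ) => decide ((i : Int) < (m : Int) - 1) && (xs[i]? == some '1') && (xs[i+1]? == some '1')))
      = (List.range (m - 1)).countP (fun i => (xs[i]? == some '1') && (xs[i+1]? == some '1')) := by
  cases m with
  | zero => simp
  | succ m =>
    rw [List.range_succ, List.countP_append]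
    have h1 : (List.range m).countP
        (fun (i : ℕ) => decide ((i : Int) < (m : Int) + 1 - 1) && (xs[i]? == some '1') && (xs[i+1]? == some '1'))
        = (List.range m).countP (fun i => (xs[i]? == some '1') && (xs[i+1]? == some '1')) := by
      apply List.countP_congr
      intro i hi
      have hlt : i < m := List.mem_range.mp hi
      have hx : ((i : Int) < (m : Int) + 1 - 1) := by push_cast; omega
      simp [hlt, hx]
    push_cast at h1 ⊢
    rw [h1]
    simp

-- The pair zip/range count on a full-length prefix: indices below m-1 read the original list.
lemma pv_prefix_pairs (xs : List Char) (m : ℕ) (hm : m ≤ xs.length) :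
    ((xs.take m).zip (PySem.List.slice (xs.take m) (some 1) none)).countP pvPairOne
      = (List.range (m - 1)).countP (fun i => (xs[i]? == some '1') && (xs[i+1]? == some '1')) := by
  rw [PySem.List.slice_from_one, pv_zip_count]
  have hlen : (xs.take m).length = m := by simp; omega
  rw [hlen]
  apply List.countP_congr
  intro i hi
  have h1 : i < m - 1 := List.mem_range.mp hi
  simp [List.getElem?_take, (by omega : i < m), (by omega : i + 1 < m)]

-- The main equality for positive colCount = m with rows long enough.
lemma pv_eq_pos (c : Int) (r1 r2 : String) (m : ℕ) (hc : c = (m : Int))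
    (h1 : m ≤ r1.toList.length) (h2 : m ≤ r2.toList.length) :
    problemCode c r1 r2 = problemCode_alt c r1 r2 := by
  subst hc
  unfold problemCode problemCode_alt
  have hmax : max (m : Int) 0 = ((m : ℕ) : Int) := by omega
  rw [pv_main, pv_row_count, pv_row_count, pv_ov_count]
  simp only [hmax]
  rw [PySem.List.slice_to_natCast, PySem.List.slice_to_natCast]
  rw [pv_take_count r1.toList m h1, pv_take_count r2.toList m h2,
    pv_prefix_pairs r1.toList m h1, pv_prefix_pairs r2.toList m h2,
    pv_enum_count r1.toList r2.toList m h1 h2,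
    pv_guard_collapse r1.toList m, pv_guard_collapse r2.toList m]
  congr 1
  push_cast
  ring

lemma pv_eq (c : Int) (r1 r2 : String) (hp : Pre_problemCode c r1 r2) :
    problemCode c r1 r2 = problemCode_alt c r1 r2 := by
  by_cases hc : c ≤ 0
  · unfold problemCode problemCode_alt
    have hmax : max c 0 = (0 : Int) := by omega
    rw [PySem.List.pyRange_one_eq_nil hc]
    have h0 : ∀ (xs : List Char), PySem.List.slice xs none (some ((0:ℕ):Int)) = xs.take 0 :=
      fun xs => PySem.List.slice_to_natCast xs 0
    simp only [Nat.cast_zero] at h0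
    simp [hmax, h0, PySem.List.enumerate]
  · obtain ⟨n, rfl⟩ : ∃ n : ℕ, c = (n : Int) :=
      ⟨c.toNat, (Int.toNat_of_nonneg (by omega)).symm⟩
    have h := hp (by omega)
    exact pv_eq_pos _ r1 r2 n rfl (by exact_mod_cast h.1) (by exact_mod_cast h.2)

-- ===== VERDICT (by name: the statement is the Claim_ definition above) =====
theorem problemCode_spec : Claim_equal_problemCode := by
  intro c r1 r2 _ hp
  exact pv_eq c r1 r2 hp
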